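-- pv_equiv track=rewrite | github.com/W-Thurston/Advent-of-Code-Lets-Learn | src/aoc2025/solutions/day06/elegant.py | part1
-- ===== SOURCE A (Python) =====
-- def multiply(values: list[int]) -> int:
--     result = 1
--     for v in values:
--         result *= v
--     return result
--
-- def part1(data: list[str]) -> int:
--     """Elegant structured implementation of Part 1."""
--     if not data:
--         return 0
--
--     rows: list[list[str]] = [r.split() for r in data]
--     operators: list[str] = rows[-1]
--     num_cols: int = len(operators)
--
--     total = 0
--     for c in range(num_cols):
--         op: str = operators[c]
--         nums: list[int] = [int(rows[r][c]) for r in range(len(rows) - 1)]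
--         total += sum(nums) if op == "+" else multiply(nums)
--
--     return total
-- ===== SOURCE B (Python) =====
-- def part1(data: list[str]) -> int:
--     """One pass over the data rows, keeping a per-column accumulator seeded from the operator row."""
--     if not data:
--         return 0
--     rows = [r.split() for r in data]
--     operators = rows[-1]
--     acc = [0 if op == "+" else 1 for op in operators]
--     for row in rows[:-1]:
--         acc = [a + int(x) if op == "+" else a * int(x)
--                for a, op, x in zip(acc, operators, row)]
--     return sum(acc)
-- ===== Notes on version B (the rewrite author's own statement) =====
-- stated objective: alternative
-- what changed: A loops column-major (for each column it re-scans all data rows building a list, then sums or multiplies it); B makes a single row-major pass keeping a per-column accumulator list seeded from the operator row and sums it at the end.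
import Mathlib
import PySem

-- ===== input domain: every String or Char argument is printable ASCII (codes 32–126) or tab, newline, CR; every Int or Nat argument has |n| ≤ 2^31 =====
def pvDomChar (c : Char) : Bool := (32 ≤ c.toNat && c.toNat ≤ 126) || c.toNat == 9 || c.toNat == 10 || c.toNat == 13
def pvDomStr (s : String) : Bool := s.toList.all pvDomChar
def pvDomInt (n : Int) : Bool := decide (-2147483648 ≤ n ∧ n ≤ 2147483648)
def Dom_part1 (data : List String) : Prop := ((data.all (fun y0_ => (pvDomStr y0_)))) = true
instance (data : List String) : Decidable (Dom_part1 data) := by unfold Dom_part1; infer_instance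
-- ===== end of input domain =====

-- B replaces A's column-major double loop (one pass over every column re-scanning all rows)
-- by a single row-major pass that carries a per-column accumulator list seeded from the
-- operator row; same return value, different decomposition (objective: alternative).

-- ===== PORT A =====
def pvMultiply (values : List Int) : Int :=
  values.foldl (fun result v => result * v) 1

def part1 (data : List String) : Int :=
  if data = [] then 0
  else
    let rows : List (List String) := data.map PySem.Str.split₀
    let operators : List String := PySem.List.pyGetD rows (-1) []
    let numCols : Int := (operators.length : Int)
    (PySem.List.pyRange 0 numCols).foldl (fun total c =>
      let op : String := PySem.List.pyGetD operators c ""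
      let nums : List Int := (PySem.List.pyRange 0 ((rows.length : Int) - 1)).map
        (fun r => (PySem.Int.ofStr? (PySem.List.pyGetD (PySem.List.pyGetD rows r []) c "")).getD 0)
      total + (if op = "+" then nums.sum else pvMultiply nums)) 0

-- ===== PORT B =====
def part1_alt (data : List String) : Int :=
  if data = [] then 0
  else
    let rows : List (List String) := data.map PySem.Str.split₀
    let operators : List String := PySem.List.pyGetD rows (-1) []
    let acc0 : List Int := operators.map (fun op => if op = "+" then (0 : Int) else 1)
    (rows.dropLast.foldl (fun acc row =>
      ((acc.zip operators).zip row).map (fun p =>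
        if p.1.2 = "+" then p.1.1 + (PySem.Int.ofStr? p.2).getD 0
        else p.1.1 * (PySem.Int.ofStr? p.2).getD 0)) acc0).sum

-- ===== PRECONDITION & SPEC =====
-- Pre_ excludes exactly the inputs on which the Python A raises: a data row (after split)
-- shorter than the operator row (IndexError) or a read cell that int() rejects (ValueError).
def Pre_part1 (data : List String) : Prop :=
  ∀ row ∈ (data.map PySem.Str.split₀).dropLast,
    ((data.map PySem.Str.split₀).getLast?.getD []).length ≤ row.length ∧
    ∀ x ∈ row.take ((data.map PySem.Str.split₀).getLast?.getD []).length,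
      (PySem.Int.ofStr? x).isSome
instance (data : List String) : Decidable (Pre_part1 data) := by unfold Pre_part1; infer_instance

def pvWitness_part1 : List String := ["1 2", "3 4", "+ *"]

def Spec_part1 (data : List String) (out : Int) : Prop := out = part1_alt data
instance (data : List String) (out : Int) : Decidable (Spec_part1 data out) := by unfold Spec_part1; infer_instance

-- ===== CLAIM (what is proved, stated in full; the proofs are below) =====
def Claim_equal_part1 : Prop := ∀ (data : List String), Dom_part1 data → Pre_part1 data → Spec_part1 data (part1 data)

-- ===== LEMMAS AND PROOFS =====
def pvCell (row : List String) (c : Int) : Int :=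
  (PySem.Int.ofStr? (PySem.List.pyGetD row c "")).getD 0
def pvStep (op : String) (a x : Int) : Int := if op = "+" then a + x else a * x
def pvInit (op : String) : Int := if op = "+" then (0 : Int) else 1

-- xs[-1] with default = last element with default
theorem pvLast {α : Type} (xs : List α) (d : α) :
    PySem.List.pyGetD xs (-1) d = xs.getLast?.getD d := by
  simp only [PySem.List.pyGetD, PySem.List.pyGet?, PySem.List.pyIdx?]
  split_ifs with h1 h2 h3
  · exact absurd h1 (by norm_num)
  · exact absurd h1 (by norm_num)
  · simp [List.getLast?_eq_getElem?]
  · have hx : xs = [] := by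
      cases xs with
      | nil => rfl
      | cons a l => exfalso; apply h3; simp only [List.length_cons]; push_cast; omega
    subst hx; simp

-- one B-row-step, characterised column by column
theorem pvStepRow (ops : List String) (acc : List Int) (row : List String)
    (hlen : acc.length = ops.length) (hrow : ops.length ≤ row.length) :
    ((acc.zip ops).zip row).map (fun p =>
        if p.1.2 = "+" then p.1.1 + (PySem.Int.ofStr? p.2).getD 0
        else p.1.1 * (PySem.Int.ofStr? p.2).getD 0)
      = (PySem.List.pyRange 0 (ops.length : Int)).map
          (fun c => pvStep (PySem.List.pyGetD ops c "") (PySem.List.pyGetD acc c 0) (pvCell row c)) := by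
  apply List.ext_getElem
  · simp [PySem.List.length_pyRange_one]; omega
  · intro i h1 h2
    have hi : i < ops.length := by
      simp [PySem.List.length_pyRange_one] at h2; omega
    have hia : i < acc.length := by omega
    have hir : i < row.length := by omega
    simp only [List.getElem_map, List.getElem_zip, PySem.List.getElem_pyRange_one, zero_add,
      PySem.List.pyGetD_natCast, pvStep, pvCell,
      List.getD_eq_getElem _ _ hi, List.getD_eq_getElem _ _ hia, List.getD_eq_getElem _ _ hir]

-- B's whole fold, characterised column by column
theorem pvFoldChar (rs : List (List String)) (ops : List String) (acc : List Int)
    (hlen : acc.length = ops.length) (hrows : ∀ row ∈ rs, ops.length ≤ row.length) :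
    rs.foldl (fun acc row =>
        ((acc.zip ops).zip row).map (fun p =>
          if p.1.2 = "+" then p.1.1 + (PySem.Int.ofStr? p.2).getD 0
          else p.1.1 * (PySem.Int.ofStr? p.2).getD 0)) acc
      = (PySem.List.pyRange 0 (ops.length : Int)).map
          (fun c => rs.foldl (fun a row => pvStep (PySem.List.pyGetD ops c "") a (pvCell row c))
            (PySem.List.pyGetD acc c 0)) := by
  induction rs generalizing acc with
  | nil =>
    simp only [List.foldl_nil]
    rw [← hlen]
    exact (PySem.List.map_pyGetD_pyRange_zero' acc 0).symm
  | cons row rs ih =>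
    simp only [List.foldl_cons]
    rw [pvStepRow ops acc row hlen (hrows row (by simp))]
    rw [ih _ (by simp [PySem.List.length_pyRange_one]) (fun r hr => hrows r (by simp [hr]))]
    apply List.map_congr_left
    intro c hc
    obtain ⟨hc0, hcn⟩ := PySem.List.mem_pyRange_one.mp hc
    obtain ⟨k, rfl⟩ : ∃ k : Nat, c = (k : Int) := ⟨c.toNat, (Int.toNat_of_nonneg hc0).symm⟩
    have hk : k < ops.length := by exact_mod_cast hcn
    congr 1
    rw [PySem.List.pyGetD_natCast,
      List.getD_eq_getElem _ _ (by rw [List.length_map, PySem.List.length_pyRange_one]; omega),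
      List.getElem_map, PySem.List.getElem_pyRange_one, zero_add]

-- A's index loop over the data rows = a map over dropLast
theorem pvColsA {β : Type} (xs : List (List String)) (f : List String → β) :
    (PySem.List.pyRange 0 ((xs.length : Int) - 1)).map (fun r => f (PySem.List.pyGetD xs r []))
      = xs.dropLast.map f := by
  apply List.ext_getElem
  · simp [PySem.List.length_pyRange_one]
  · intro i h1 h2
    have hi : i < xs.length - 1 := by
      simp [PySem.List.length_pyRange_one] at h1; omega
    simp only [List.getElem_map, PySem.List.getElem_pyRange_one, zero_add,
      PySem.List.pyGetD_natCast, List.getD_eq_getElem _ _ (by omega : i < xs.length),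
      List.getElem_dropLast]

-- ===== VERDICT (by name: the statement is the Claim_ definition above) =====
theorem part1_spec : Claim_equal_part1 := by
  unfold Claim_equal_part1
  intro data _ hpre
  unfold Spec_part1 part1 part1_alt
  by_cases hd : data = []
  · simp [hd]
  · simp only [if_neg hd]
    have hP : ∀ row ∈ (data.map PySem.Str.split₀).dropLast,
        (PySem.List.pyGetD (data.map PySem.Str.split₀) (-1) []).length ≤ row.length := by
      intro row hr
      rw [pvLast]
      exact (hpre row hr).1
    rw [PySem.List.foldl_add]
    rw [pvFoldChar _ _ _ (by simp) hP]
    rw [zero_add]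
    congr 1
    apply List.map_congr_left
    intro c hc
    obtain ⟨hc0, hcn⟩ := PySem.List.mem_pyRange_one.mp hc
    obtain ⟨k, rfl⟩ : ∃ j : Nat, c = (j : Int) := ⟨c.toNat, (Int.toNat_of_nonneg hc0).symm⟩
    have hk : k < (PySem.List.pyGetD (data.map PySem.Str.split₀) (-1) []).length := by
      exact_mod_cast hcn
    rw [pvColsA (data.map PySem.Str.split₀)
      (fun row => (PySem.Int.ofStr? (PySem.List.pyGetD row (k : Int) "")).getD 0)]
    rw [PySem.List.pyGetD_natCast (d := (0 : Int)),
      List.getD_eq_getElem _ _ (by simpa using hk), List.getElem_map,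
      PySem.List.pyGetD_natCast (d := ""), List.getD_eq_getElem _ _ hk]
    by_cases hop : (PySem.List.pyGetD (data.map PySem.Str.split₀) (-1) [])[k] = "+"
    · simp only [hop, if_pos, pvStep, pvCell]
      rw [PySem.List.foldl_add, zero_add]
    · simp only [hop, pvStep, pvCell, if_false, pvMultiply]
      rw [List.foldl_map]
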